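-- pv_equiv track=rewrite | github.com/jstruv-bot/binger-like-checker | bot/bot.py | find_member_by_name
-- ===== SOURCE A (Python) =====
-- def find_member_by_name(mm, name):
--     """Find a member by partial name match. Returns (user_id, nickname) or None."""
--     name_lower = name.lower().strip().lstrip("@")
--     if not name_lower:
--         return None
--     # Exact match first
--     for uid, nick in mm.items():
--         if nick.lower() == name_lower:
--             return uid, nick
--     # Partial match
--     for uid, nick in mm.items():
--         if name_lower in nick.lower():
--             return uid, nick
--     return None
-- ===== SOURCE B (Python) =====
-- def find_member_by_name(mm, name):
--     """Single pass: return first exact match immediately; remember the first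
--     partial match and fall back to it after the loop."""
--     name_lower = name.lower().strip().lstrip("@")
--     if not name_lower:
--         return None
--     best_partial = None
--     for uid, nick in mm.items():
--         nick_lower = nick.lower()
--         if nick_lower == name_lower:
--             return uid, nick
--         if best_partial is None and name_lower in nick_lower:
--             best_partial = (uid, nick)
--     return best_partial
-- ===== Notes on version B (the rewrite author's own statement) =====
-- stated objective: alternative
-- what changed: Replaces A's two sequential scans (exact pass, then partial pass) with a single pass that returns immediately on an exact match and records the first partial match in a variable returned after the loop.
import Mathlib
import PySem

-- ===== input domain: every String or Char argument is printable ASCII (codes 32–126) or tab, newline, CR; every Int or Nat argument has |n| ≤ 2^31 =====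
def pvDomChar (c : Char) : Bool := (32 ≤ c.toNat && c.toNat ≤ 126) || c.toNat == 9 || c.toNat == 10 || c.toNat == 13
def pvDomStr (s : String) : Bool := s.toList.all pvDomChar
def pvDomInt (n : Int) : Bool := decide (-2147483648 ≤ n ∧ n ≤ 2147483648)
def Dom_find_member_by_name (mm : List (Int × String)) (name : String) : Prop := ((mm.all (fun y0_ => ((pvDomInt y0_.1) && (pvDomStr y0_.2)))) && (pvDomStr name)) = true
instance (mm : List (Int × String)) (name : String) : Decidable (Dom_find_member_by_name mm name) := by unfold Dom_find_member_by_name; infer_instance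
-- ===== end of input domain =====

-- B collapses A's two scans (exact pass, then partial pass) into one pass that records the
-- first partial match; same return value everywhere (objective: alternative decomposition).

-- ===== PORT A =====
-- name.lower().strip().lstrip("@"): lstrip("@") ported by hand as dropWhile (· == '@')
-- (drop leading '@' characters only), exact for Python's lstrip with a one-character set.
def pvNorm (name : String) : List Char :=
  (PySem.Chars.strip (PySem.Chars.lower name.toList)).dropWhile (· == '@')

def find_member_by_name (mm : List (Int × String)) (name : String) : Option (Int × String) :=
  let name_lower := pvNorm name
  if name_lower = [] then none
  else
    -- Exact match first
    match mm.find? (fun p => PySem.Chars.lower p.2.toList == name_lower) with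
    | some p => some p
    | none =>
      -- Partial match
      match mm.find? (fun p => PySem.Chars.isIn name_lower (PySem.Chars.lower p.2.toList)) with
      | some p => some p
      | none => none

-- ===== PORT B =====
def find_member_by_name_alt_loop (name_lower : List Char) (best : Option (Int × String)) :
    List (Int × String) → Option (Int × String)
  | [] => best
  | p :: rest =>
    let nick_lower := PySem.Chars.lower p.2.toList
    if nick_lower = name_lower then some p
    else
      find_member_by_name_alt_loop name_lower
        (if best.isNone && PySem.Chars.isIn name_lower nick_lower then some p else best) rest

def find_member_by_name_alt (mm : List (Int × String)) (name : String) : Option (Int × String) :=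
  let name_lower := (PySem.Chars.strip (PySem.Chars.lower name.toList)).dropWhile (· == '@')
  if name_lower = [] then none
  else find_member_by_name_alt_loop name_lower none mm

-- ===== PRECONDITION & SPEC =====
def Spec_find_member_by_name (mm : List (Int × String)) (name : String) (out : Option (Int × String)) : Prop := out = find_member_by_name_alt mm name
instance (mm : List (Int × String)) (name : String) (out : Option (Int × String)) : Decidable (Spec_find_member_by_name mm name out) := by unfold Spec_find_member_by_name; infer_instance

-- ===== CLAIM (what is proved, stated in full; the proofs are below) =====
def Claim_equal_find_member_by_name : Prop := ∀ (mm : List (Int × String)) (name : String), Dom_find_member_by_name mm name → Spec_find_member_by_name mm name (find_member_by_name mm name)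

-- ===== LEMMAS AND PROOFS =====
theorem alt_loop_eq (nl : List Char) (best : Option (Int × String)) (mm : List (Int × String)) :
    find_member_by_name_alt_loop nl best mm =
      match mm.find? (fun p => PySem.Chars.lower p.2.toList == nl) with
      | some p => some p
      | none =>
        match best with
        | some b => some b
        | none => mm.find? (fun p => PySem.Chars.isIn nl (PySem.Chars.lower p.2.toList)) := by
  induction mm generalizing best with
  | nil => cases best <;> simp [find_member_by_name_alt_loop]
  | cons p rest ih =>
    by_cases hx : PySem.Chars.lower p.2.toList = nl
    · simp [find_member_by_name_alt_loop, List.find?, hx]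
    · cases best with
      | some b =>
        simp only [find_member_by_name_alt_loop, List.find?, hx, ih,
          beq_eq_false_iff_ne.mpr hx, Bool.false_and, Option.isNone_some, if_false]
        cases List.find? (fun p => PySem.Chars.lower p.2.toList == nl) rest <;> simp
      | none =>
        by_cases hp : PySem.Chars.isIn nl (PySem.Chars.lower p.2.toList) = true
        · simp only [find_member_by_name_alt_loop, List.find?, hx, hp, ih,
            beq_eq_false_iff_ne.mpr hx, Option.isNone_none, Bool.true_and, if_true, if_false]
        · simp only [find_member_by_name_alt_loop, List.find?, hx, hp, ih,
            beq_eq_false_iff_ne.mpr hx, Option.isNone_none, Bool.true_and, if_false]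
          cases List.find? (fun p => PySem.Chars.lower p.2.toList == nl) rest <;> simp

-- ===== VERDICT (by name: the statement is the Claim_ definition above) =====
theorem find_member_by_name_spec : Claim_equal_find_member_by_name := by
  intro mm name _
  unfold Spec_find_member_by_name find_member_by_name find_member_by_name_alt
  simp only [pvNorm]
  by_cases h : (PySem.Chars.strip (PySem.Chars.lower name.toList)).dropWhile (· == '@') = []
  · simp [h]
  · simp only [h, if_false, alt_loop_eq]
    cases List.find? (fun p => PySem.Chars.lower p.2.toList == List.dropWhile (fun x => x == '@') (PySem.Chars.strip (PySem.Chars.lower name.toList))) mm <;>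
      cases List.find? (fun p => PySem.Chars.isIn (List.dropWhile (fun x => x == '@') (PySem.Chars.strip (PySem.Chars.lower name.toList))) (PySem.Chars.lower p.2.toList)) mm <;> simp
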